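-- pv_equiv track=rewrite | github.com/NikunjKaushik20/PolicyPulse | app.py | detect_policy
-- ===== SOURCE A (Python) =====
-- def detect_policy(query):
--     """detect policy from keywords"""
--     q = query.lower()
--
--     # check keywords
--     if any(w in q for w in ["rti", "right to information", "transparency"]):
--         return "RTI"
--     if any(w in q for w in ["nrega", "mgnrega", "rural employment"]):
--         return "NREGA"
--     if any(w in q for w in ["nep", "education policy", "curriculum"]):
--         return "NEP"
--     if any(w in q for w in ["pm kisan", "farmer", "6000"]):
--         return "PM-KISAN"
--     if any(w in q for w in ["swachh", "clean india", "toilet"]):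
--         return "SWACHH-BHARAT"
--     if any(w in q for w in ["digital india", "upi", "aadhaar"]):
--         return "DIGITAL-INDIA"
--     if any(w in q for w in ["ayushman", "health coverage", "insurance"]):
--         return "AYUSHMAN-BHARAT"
--     if any(w in q for w in ["make in india", "manufacturing", "pli"]):
--         return "MAKE-IN-INDIA"
--     if any(w in q for w in ["skill india", "training", "pmkvy"]):
--         return "SKILL-INDIA"
--     if any(w in q for w in ["smart city", "iot", "urban"]):
--         return "SMART-CITIES"
--
--     return "NREGA"  # default
-- ===== SOURCE B (Python) =====
-- # Arg-min scan over a flat keyword->priority table (no early return); the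
-- # default "NREGA" is just the initial accumulator with sentinel priority 10.
-- POLICY_KEYWORDS = [
--     ("rti", 0, "RTI"), ("right to information", 0, "RTI"), ("transparency", 0, "RTI"),
--     ("nrega", 1, "NREGA"), ("mgnrega", 1, "NREGA"), ("rural employment", 1, "NREGA"),
--     ("nep", 2, "NEP"), ("education policy", 2, "NEP"), ("curriculum", 2, "NEP"),
--     ("pm kisan", 3, "PM-KISAN"), ("farmer", 3, "PM-KISAN"), ("6000", 3, "PM-KISAN"),
--     ("swachh", 4, "SWACHH-BHARAT"), ("clean india", 4, "SWACHH-BHARAT"), ("toilet", 4, "SWACHH-BHARAT"),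
--     ("digital india", 5, "DIGITAL-INDIA"), ("upi", 5, "DIGITAL-INDIA"), ("aadhaar", 5, "DIGITAL-INDIA"),
--     ("ayushman", 6, "AYUSHMAN-BHARAT"), ("health coverage", 6, "AYUSHMAN-BHARAT"), ("insurance", 6, "AYUSHMAN-BHARAT"),
--     ("make in india", 7, "MAKE-IN-INDIA"), ("manufacturing", 7, "MAKE-IN-INDIA"), ("pli", 7, "MAKE-IN-INDIA"),
--     ("skill india", 8, "SKILL-INDIA"), ("training", 8, "SKILL-INDIA"), ("pmkvy", 8, "SKILL-INDIA"),
--     ("smart city", 9, "SMART-CITIES"), ("iot", 9, "SMART-CITIES"), ("urban", 9, "SMART-CITIES"),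
-- ]
--
-- def detect_policy(query):
--     """detect policy from keywords"""
--     q = query.lower()
--     best_p, best_name = 10, "NREGA"
--     for kw, p, name in POLICY_KEYWORDS:
--         if kw in q and p < best_p:
--             best_p, best_name = p, name
--     return best_name
-- ===== Notes on version B (the rewrite author's own statement) =====
-- stated objective: alternative
-- what changed: A's ordered if-chain of grouped any() membership checks with early returns is replaced by a single arg-min scan over a flat (keyword, priority, policy) table: B keeps the lowest-priority matching keyword in an accumulator with no early return, and the NREGA default is just the initial accumulator.
import Mathlib
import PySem

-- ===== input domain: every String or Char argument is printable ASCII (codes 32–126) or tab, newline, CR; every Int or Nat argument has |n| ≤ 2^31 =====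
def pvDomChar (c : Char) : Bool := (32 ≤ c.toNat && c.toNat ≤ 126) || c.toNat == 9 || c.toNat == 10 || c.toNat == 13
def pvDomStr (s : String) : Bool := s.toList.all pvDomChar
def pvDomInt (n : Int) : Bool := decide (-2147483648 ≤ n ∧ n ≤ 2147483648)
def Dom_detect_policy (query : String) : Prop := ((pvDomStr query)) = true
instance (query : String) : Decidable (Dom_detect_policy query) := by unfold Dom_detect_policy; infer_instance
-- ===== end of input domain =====

-- B replaces A's ordered if-chain of grouped any() checks by an arg-min scan over a
-- flat (keyword, priority, policy) table with no early return (objective: alternative).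

-- ===== PORT A =====
def detect_policy (query : String) : String :=
  let q := PySem.Str.lower query
  if (["rti", "right to information", "transparency"].any (fun w => PySem.Str.isIn w q)) then "RTI"
  else if (["nrega", "mgnrega", "rural employment"].any (fun w => PySem.Str.isIn w q)) then "NREGA"
  else if (["nep", "education policy", "curriculum"].any (fun w => PySem.Str.isIn w q)) then "NEP"
  else if (["pm kisan", "farmer", "6000"].any (fun w => PySem.Str.isIn w q)) then "PM-KISAN"
  else if (["swachh", "clean india", "toilet"].any (fun w => PySem.Str.isIn w q)) then "SWACHH-BHARAT"
  else if (["digital india", "upi", "aadhaar"].any (fun w => PySem.Str.isIn w q)) then "DIGITAL-INDIA"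
  else if (["ayushman", "health coverage", "insurance"].any (fun w => PySem.Str.isIn w q)) then "AYUSHMAN-BHARAT"
  else if (["make in india", "manufacturing", "pli"].any (fun w => PySem.Str.isIn w q)) then "MAKE-IN-INDIA"
  else if (["skill india", "training", "pmkvy"].any (fun w => PySem.Str.isIn w q)) then "SKILL-INDIA"
  else if (["smart city", "iot", "urban"].any (fun w => PySem.Str.isIn w q)) then "SMART-CITIES"
  else "NREGA"

-- ===== PORT B =====
def policyKeywords : List (String × Int × String) :=
  [ ("rti", 0, "RTI"), ("right to information", 0, "RTI"), ("transparency", 0, "RTI"),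
    ("nrega", 1, "NREGA"), ("mgnrega", 1, "NREGA"), ("rural employment", 1, "NREGA"),
    ("nep", 2, "NEP"), ("education policy", 2, "NEP"), ("curriculum", 2, "NEP"),
    ("pm kisan", 3, "PM-KISAN"), ("farmer", 3, "PM-KISAN"), ("6000", 3, "PM-KISAN"),
    ("swachh", 4, "SWACHH-BHARAT"), ("clean india", 4, "SWACHH-BHARAT"), ("toilet", 4, "SWACHH-BHARAT"),
    ("digital india", 5, "DIGITAL-INDIA"), ("upi", 5, "DIGITAL-INDIA"), ("aadhaar", 5, "DIGITAL-INDIA"),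
    ("ayushman", 6, "AYUSHMAN-BHARAT"), ("health coverage", 6, "AYUSHMAN-BHARAT"), ("insurance", 6, "AYUSHMAN-BHARAT"),
    ("make in india", 7, "MAKE-IN-INDIA"), ("manufacturing", 7, "MAKE-IN-INDIA"), ("pli", 7, "MAKE-IN-INDIA"),
    ("skill india", 8, "SKILL-INDIA"), ("training", 8, "SKILL-INDIA"), ("pmkvy", 8, "SKILL-INDIA"),
    ("smart city", 9, "SMART-CITIES"), ("iot", 9, "SMART-CITIES"), ("urban", 9, "SMART-CITIES") ]

-- the loop body: keep the lowest-priority matching keyword seen so far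
def pvStep (q : String) (best : Int × String) (e : String × Int × String) : Int × String :=
  if PySem.Str.isIn e.1 q = true ∧ e.2.1 < best.1 then (e.2.1, e.2.2) else best

def detect_policy_alt (query : String) : String :=
  let q := PySem.Str.lower query
  (policyKeywords.foldl (pvStep q) ((10 : Int), "NREGA")).2

-- ===== PRECONDITION & SPEC =====
def Spec_detect_policy (query : String) (out : String) : Prop := out = detect_policy_alt query
instance (query : String) (out : String) : Decidable (Spec_detect_policy query out) := by unfold Spec_detect_policy; infer_instance

-- ===== CLAIM (what is proved, stated in full; the proofs are below) =====
def Claim_equal_detect_policy : Prop := ∀ (query : String), Dom_detect_policy query → Spec_detect_policy query (detect_policy query)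

-- ===== LEMMAS AND PROOFS =====

-- once the accumulator's priority is ≤ every remaining priority, the fold is constant
theorem pvStep_skip {q : String} {acc : Int × String} {L : List (String × Int × String)}
    (h : ∀ e ∈ L, ¬ e.2.1 < acc.1) : L.foldl (pvStep q) acc = acc := by
  induction L with
  | nil => rfl
  | cons e t ih =>
    have he : pvStep q acc e = acc := by
      unfold pvStep
      rw [if_neg]
      rintro ⟨_, hlt⟩
      exact h e (by simp) hlt
    simp only [List.foldl_cons, he]
    exact ih (fun e' he' => h e' (by simp [he']))

-- folding one 3-keyword group of priority p into an accumulator of larger priority P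
theorem pvStep_group {q k1 k2 k3 : String} {p P : Int} {n N : String}
    {rest : List (String × Int × String)} (hp : p < P) :
    List.foldl (pvStep q) (P, N) ((k1, p, n) :: (k2, p, n) :: (k3, p, n) :: rest)
      = List.foldl (pvStep q)
          (if [k1, k2, k3].any (fun w => PySem.Str.isIn w q) then (p, n) else (P, N)) rest := by
  simp only [List.foldl_cons, List.any_cons, List.any_nil, Bool.or_false]
  congr 1
  cases h1 : PySem.Chars.isIn k1.toList q.toList <;>
    cases h2 : PySem.Chars.isIn k2.toList q.toList <;>
      cases h3 : PySem.Chars.isIn k3.toList q.toList <;>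
        simp [pvStep, h1, h2, h3, hp, lt_self_iff_false]

-- ===== VERDICT (by name: the statement is the Claim_ definition above) =====
theorem detect_policy_spec : Claim_equal_detect_policy := by
  intro query _
  unfold Spec_detect_policy
  simp only [detect_policy, detect_policy_alt, policyKeywords]
  rw [pvStep_group (show (0:Int) < 10 by norm_num)]
  by_cases h1 : (["rti", "right to information", "transparency"].any
      (fun w => PySem.Str.isIn w (PySem.Str.lower query))) = true
  · simp only [if_pos h1]
    rw [pvStep_skip] <;> decide
  · simp only [if_neg h1]
    rw [pvStep_group (show (1:Int) < 10 by norm_num)]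
    by_cases h2 : (["nrega", "mgnrega", "rural employment"].any
        (fun w => PySem.Str.isIn w (PySem.Str.lower query))) = true
    · simp only [if_pos h2]
      rw [pvStep_skip] <;> decide
    · simp only [if_neg h2]
      rw [pvStep_group (show (2:Int) < 10 by norm_num)]
      by_cases h3 : (["nep", "education policy", "curriculum"].any
          (fun w => PySem.Str.isIn w (PySem.Str.lower query))) = true
      · simp only [if_pos h3]
        rw [pvStep_skip] <;> decide
      · simp only [if_neg h3]
        rw [pvStep_group (show (3:Int) < 10 by norm_num)]
        by_cases h4 : (["pm kisan", "farmer", "6000"].any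
            (fun w => PySem.Str.isIn w (PySem.Str.lower query))) = true
        · simp only [if_pos h4]
          rw [pvStep_skip] <;> decide
        · simp only [if_neg h4]
          rw [pvStep_group (show (4:Int) < 10 by norm_num)]
          by_cases h5 : (["swachh", "clean india", "toilet"].any
              (fun w => PySem.Str.isIn w (PySem.Str.lower query))) = true
          · simp only [if_pos h5]
            rw [pvStep_skip] <;> decide
          · simp only [if_neg h5]
            rw [pvStep_group (show (5:Int) < 10 by norm_num)]
            by_cases h6 : (["digital india", "upi", "aadhaar"].any
                (fun w => PySem.Str.isIn w (PySem.Str.lower query))) = true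
            · simp only [if_pos h6]
              rw [pvStep_skip] <;> decide
            · simp only [if_neg h6]
              rw [pvStep_group (show (6:Int) < 10 by norm_num)]
              by_cases h7 : (["ayushman", "health coverage", "insurance"].any
                  (fun w => PySem.Str.isIn w (PySem.Str.lower query))) = true
              · simp only [if_pos h7]
                rw [pvStep_skip] <;> decide
              · simp only [if_neg h7]
                rw [pvStep_group (show (7:Int) < 10 by norm_num)]
                by_cases h8 : (["make in india", "manufacturing", "pli"].any
                    (fun w => PySem.Str.isIn w (PySem.Str.lower query))) = true
                · simp only [if_pos h8]
                  rw [pvStep_skip] <;> decide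
                · simp only [if_neg h8]
                  rw [pvStep_group (show (8:Int) < 10 by norm_num)]
                  by_cases h9 : (["skill india", "training", "pmkvy"].any
                      (fun w => PySem.Str.isIn w (PySem.Str.lower query))) = true
                  · simp only [if_pos h9]
                    rw [pvStep_skip] <;> decide
                  · simp only [if_neg h9]
                    rw [pvStep_group (show (9:Int) < 10 by norm_num)]
                    by_cases h10 : (["smart city", "iot", "urban"].any
                        (fun w => PySem.Str.isIn w (PySem.Str.lower query))) = true
                    · simp only [if_pos h10]
                      rw [pvStep_skip] <;> decide
                    · simp only [if_neg h10]
                      rfl
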